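-- pv_equiv track=rewrite | github.com/yourwest/ecommerceSearch | VPR/langutils.py | del_comma
-- ===== SOURCE A (Python) =====
-- def del_comma(word: str):
--     word = word.strip(',')
--     word_clear = ''
--     for i in range(len(word)):
--         if word[i] != ',' or (word[i] == ',' and word[i + 1].isdigit() and word[i - 1].isdigit()):
--             word_clear += word[i]
--         else:
--             word_clear += ' '
--     word = word_clear
--     return word
-- ===== SOURCE B (Python) =====
-- def del_comma(word: str):
--     # Strip outer commas, split on ',', then rejoin the parts deciding each
--     # boundary once: ',' between a digit and a digit, ' ' otherwise.
--     parts = word.strip(',').split(',')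
--     pieces = [parts[0]]
--     for left, right in zip(parts, parts[1:]):
--         pieces.append(',' if left[-1:].isdigit() and right[:1].isdigit() else ' ')
--         pieces.append(right)
--     return ''.join(pieces)
-- ===== Notes on version B (the rewrite author's own statement) =====
-- stated objective: faster
-- what changed: B splits the comma-stripped word on ',' and rejoins the parts with one boundary decision per comma (''.join), instead of A's per-character index loop that tests word[i-1]/word[i+1] and grows the result by repeated string concatenation.
import Mathlib
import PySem

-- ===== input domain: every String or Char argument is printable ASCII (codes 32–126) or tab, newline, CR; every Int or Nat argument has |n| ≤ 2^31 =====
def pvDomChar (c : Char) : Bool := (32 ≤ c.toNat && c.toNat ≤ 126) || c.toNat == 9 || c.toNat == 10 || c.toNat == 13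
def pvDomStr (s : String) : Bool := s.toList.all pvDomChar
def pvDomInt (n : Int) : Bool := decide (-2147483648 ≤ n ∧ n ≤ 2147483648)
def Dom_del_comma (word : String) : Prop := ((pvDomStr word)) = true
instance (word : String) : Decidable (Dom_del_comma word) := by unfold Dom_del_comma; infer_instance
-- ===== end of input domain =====

-- B replaces A's per-character index loop with split-on-comma + rejoin of the parts; A = B on all inputs (A is total).

-- ===== PORT A =====
-- x.isdigit() applied to an optional character: none (slot out of range) behaves as a non-digit.
-- In A, word[i+1] is only evaluated when word[i] == ',' and after strip(',') a comma is never
-- last, so the out-of-range case is unreachable there; word[i-1] at i = 0 is Python's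
-- negative-index wraparound word[-1], which pyGet? models exactly.
def digO (o : Option Char) : Bool := (o.map PySem.Chars.isdigit).getD false

-- loop body: "if word[i] != ',' or (word[i] == ',' and word[i+1].isdigit() and word[i-1].isdigit())"
def aStep (cs : List Char) (acc : List Char) (i : Int) : List Char :=
  let c := (PySem.List.pyGet? cs i).getD ' '   -- i ∈ range(len(cs)): always in range
  if c != ',' || (c == ',' && digO (PySem.List.pyGet? cs (i + 1)) && digO (PySem.List.pyGet? cs (i - 1))) then
    acc ++ [c]
  else
    acc ++ [' ']

-- "for i in range(len(word)): word_clear += ..."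
def aLoop (cs : List Char) : List Char :=
  (PySem.List.pyRange 0 (cs.length : Int) 1).foldl (aStep cs) []

def del_comma (word : String) : String :=
  String.ofList (aLoop (PySem.Chars.stripChars word.toList [',']))

-- ===== PORT B =====
-- "',' if left[-1:].isdigit() and right[:1].isdigit() else ' '"
def sepPiece (l r : List Char) : List Char :=
  if PySem.Chars.strIsdigit (PySem.List.slice l (some (-1)) none)
      && PySem.Chars.strIsdigit (PySem.List.slice r none (some 1)) then [','] else [' ']

-- "pieces = [parts[0]]; for left, right in zip(parts, parts[1:]): pieces.append(sep); pieces.append(right)"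
def bPieces (parts : List (List Char)) : List (List Char) :=
  match parts with
  | [] => []          -- unreachable: split always returns at least one piece
  | p :: rest =>
      (parts.zip rest).foldl (fun acc pr => acc ++ [sepPiece pr.1 pr.2, pr.2]) [p]

def del_comma_alt (word : String) : String :=
  String.ofList (PySem.Chars.join []
    (bPieces (PySem.Chars.splitOn (PySem.Chars.stripChars word.toList [',']) [','])))

-- ===== PRECONDITION & SPEC =====
def Spec_del_comma (word : String) (out : String) : Prop := out = del_comma_alt word
instance (word : String) (out : String) : Decidable (Spec_del_comma word out) := by unfold Spec_del_comma; infer_instance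

-- ===== CLAIM (what is proved, stated in full; the proofs are below) =====
def Claim_equal_del_comma : Prop := ∀ (word : String), Dom_del_comma word → Spec_del_comma word (del_comma word)

-- ===== LEMMAS AND PROOFS =====

-- A's scan as a structural recursion carrying "previous char is a digit"
def gA (pd : Bool) : List Char → List Char
  | [] => []
  | c :: rest =>
      (if c != ',' || (c == ',' && digO rest.head? && pd) then c else ' ') :: gA (PySem.Chars.isdigit c) rest

lemma gA_cons (pd : Bool) (c : Char) (rest : List Char) :
    gA pd (c :: rest)
      = (if c != ',' || (c == ',' && digO rest.head? && pd) then c else ' ') :: gA (PySem.Chars.isdigit c) rest := rfl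

-- reference splitter on ',' (accumulator-free)
def sc0 : List Char → List (List Char)
  | [] => [[]]
  | c :: rest => if c = ',' then [] :: sc0 rest else
      match sc0 rest with
      | p :: ps => (c :: p) :: ps
      | [] => [[c]]

def consHead (x : List Char) : List (List Char) → List (List Char)
  | p :: ps => (x ++ p) :: ps
  | [] => [x]

-- B's rejoin as a structural recursion ("previous part ends in a digit")
def tailJoin (pd : Bool) : List (List Char) → List Char
  | [] => []
  | q :: qs => (if pd && digO q.head? then ',' else ' ') :: (q ++ tailJoin (digO q.getLast?) qs)

lemma sc0_ne_nil (l : List Char) : sc0 l ≠ [] := by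
  cases l with
  | nil => simp [sc0]
  | cons c rest =>
      simp only [sc0]
      split
      · simp
      · split <;> simp_all

lemma sc0_cons_comma (l : List Char) : sc0 (',' :: l) = [] :: sc0 l := by
  simp [sc0]

lemma consHead_nil_of_ne (ps : List (List Char)) (h : ps ≠ []) : consHead [] ps = ps := by
  cases ps with
  | nil => exact absurd rfl h
  | cons p ps => simp [consHead]

lemma consHead_consHead (x y : List Char) (ps : List (List Char)) :
    consHead x (consHead y ps) = consHead (x ++ y) ps := by
  cases ps <;> simp [consHead]

lemma sc0_cons_of_ne (c : Char) (rest : List Char) (h : c ≠ ',') :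
    sc0 (c :: rest) = consHead [c] (sc0 rest) := by
  simp only [sc0, if_neg h]
  cases hh : sc0 rest <;> simp [consHead]

-- the fuel loop behind splitOn, at the one-character separator [','], is sc0
lemma splitOn_go_spec (l : List Char) : ∀ (cur : List Char) (acc : List (List Char)) (fuel : Nat),
    l.length < fuel →
    PySem.Chars.splitOn.go [','] fuel l cur acc = acc.reverse ++ consHead cur.reverse (sc0 l) := by
  induction l with
  | nil =>
      intro cur acc fuel h
      cases fuel with
      | zero => omega
      | succ f => simp [PySem.Chars.splitOn.go, sc0, consHead]
  | cons c rest ih =>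
      intro cur acc fuel h
      cases fuel with
      | zero => omega
      | succ f =>
        by_cases hc : c = ','
        · subst hc
          have hpre : [','].isPrefixOf (',' :: rest) = true := by simp [List.isPrefixOf]
          simp only [PySem.Chars.splitOn.go, hpre, if_true, List.length_cons, List.length_nil,
            List.drop_succ_cons, List.drop_zero]
          rw [ih [] ((cur.reverse) :: acc) f (by simp at h; omega)]
          simp only [List.reverse_nil]
          rw [consHead_nil_of_ne _ (sc0_ne_nil rest), sc0_cons_comma]
          simp [consHead]
        · have hpre : [','].isPrefixOf (c :: rest) = false := by
            simp [List.isPrefixOf]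
            exact fun hh => hc hh.symm
          simp only [PySem.Chars.splitOn.go, hpre, Bool.false_eq_true, if_false]
          rw [ih (c :: cur) acc f (by simp at h; omega)]
          rw [sc0_cons_of_ne c rest hc, consHead_consHead]
          simp

lemma splitOn_eq_sc0 (cs : List Char) : PySem.Chars.splitOn cs [','] = sc0 cs := by
  unfold PySem.Chars.splitOn
  rw [splitOn_go_spec cs [] [] (cs.length + 1) (by omega)]
  simp [consHead_nil_of_ne _ (sc0_ne_nil cs)]

-- digit-ness of the first part's head agrees with digit-ness of the list's head
lemma digO_sc0_head (l : List Char) (q : List Char) (qs : List (List Char)) (h : sc0 l = q :: qs) :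
    digO q.head? = digO l.head? := by
  cases l with
  | nil =>
      simp only [sc0] at h
      rw [List.cons_eq_cons] at h
      obtain ⟨h1, _⟩ := h
      simp [← h1]
  | cons c rest =>
      by_cases hc : c = ','
      · subst hc
        rw [sc0_cons_comma] at h
        rw [List.cons_eq_cons] at h
        obtain ⟨h1, _⟩ := h
        simp [← h1, digO, PySem.Chars.isdigit]
      · rw [sc0_cons_of_ne c rest hc] at h
        cases hh : sc0 rest with
        | nil => exact absurd hh (sc0_ne_nil rest)
        | cons p ps =>
            rw [hh] at h
            simp only [consHead] at h
            rw [List.cons_eq_cons] at h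
            obtain ⟨h1, _⟩ := h
            simp [← h1]

-- heart: A's scan equals B's rejoin of the split, as long as ',' is not the last character
lemma gA_eq_join (l : List Char) : ∀ (pd : Bool) (q : List Char) (qs : List (List Char)),
    l.getLast? ≠ some ',' → sc0 l = q :: qs →
    gA pd l = q ++ tailJoin (if q.isEmpty then pd else digO q.getLast?) qs := by
  induction l with
  | nil =>
      intro pd q qs _ h
      simp only [sc0] at h
      rw [List.cons_eq_cons] at h
      obtain ⟨h1, h2⟩ := h
      subst h1; subst h2
      simp [gA, tailJoin]
  | cons c rest ih =>
      intro pd q qs hl h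
      by_cases hc : c = ','
      · subst hc
        cases rest with
        | nil => simp at hl
        | cons d rs =>
          have hrl : (d :: rs).getLast? ≠ some ',' := by
            simpa [List.getLast?_cons_cons] using hl
          rw [sc0_cons_comma] at h
          rw [List.cons_eq_cons] at h
          obtain ⟨h1, h2⟩ := h
          subst h1
          cases hqq : sc0 (d :: rs) with
          | nil => exact absurd hqq (sc0_ne_nil _)
          | cons q' qs' =>
            rw [hqq] at h2
            subst h2
            have ihh := ih false q' qs' hrl hqq
            have hdig : (if q'.isEmpty then false else digO q'.getLast?) = digO q'.getLast? := by
              cases q' <;> simp [digO]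
            rw [hdig] at ihh
            have hd : digO q'.head? = digO ((d :: rs).head?) := digO_sc0_head _ _ _ hqq
            rw [gA_cons]
            simp only [tailJoin, List.isEmpty_nil, if_true, List.nil_append]
            rw [show PySem.Chars.isdigit ',' = false from by decide, ihh, hd]
            simp [digO, PySem.Chars.isdigit, Bool.and_comm]
      · cases rest with
        | nil =>
          rw [sc0_cons_of_ne c [] hc] at h
          simp only [sc0, consHead] at h
          rw [List.cons_eq_cons] at h
          obtain ⟨h1, h2⟩ := h
          subst h1; subst h2
          have hcb : (c != ',') = true := by simp [hc]
          simp [gA, tailJoin, hcb]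
        | cons d rs =>
          have hrl : (d :: rs).getLast? ≠ some ',' := by
            simpa [List.getLast?_cons_cons] using hl
          rw [sc0_cons_of_ne c (d :: rs) hc] at h
          cases hqq : sc0 (d :: rs) with
          | nil => exact absurd hqq (sc0_ne_nil _)
          | cons q' qs' =>
            rw [hqq] at h
            simp only [consHead, List.singleton_append] at h
            rw [List.cons_eq_cons] at h
            obtain ⟨h1, h2⟩ := h
            subst h1; subst h2
            have ihh := ih (PySem.Chars.isdigit c) q' qs' hrl hqq
            have hcb : (c != ',') = true := by simp [hc]
            rw [gA_cons, ihh]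
            have hqe : (if (c :: q').isEmpty then pd else digO ((c :: q').getLast?))
                 = (if q'.isEmpty then PySem.Chars.isdigit c else digO q'.getLast?) := by
              cases q' with
              | nil => simp [digO]
              | cons e es => simp [List.getLast?_cons_cons, digO]
            rw [hqe]
            simp [hcb]

-- A's index loop is the structural scan gA
lemma aLoop_eq_gA (cs : List Char) (n : Nat) : ∀ (k : Nat) (acc : List Char),
    cs.length - k = n → k ≤ cs.length →
    (PySem.List.pyRange (k : Int) (cs.length : Int) 1).foldl (aStep cs) acc
      = acc ++ gA (digO (PySem.List.pyGet? cs ((k : Int) - 1))) (cs.drop k) := by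
  induction n with
  | zero =>
      intro k acc hn hk
      have hke : k = cs.length := by omega
      subst hke
      rw [PySem.List.pyRange_one_eq_nil (le_refl _)]
      simp [gA]
  | succ n ih =>
      intro k acc hn hk
      have hk' : k < cs.length := by omega
      rw [PySem.List.pyRange_one_cons (by exact_mod_cast hk')]
      rw [List.foldl_cons]
      have hkk : ((k : Int) + 1) = (((k + 1 : Nat)) : Int) := by push_cast; ring
      rw [hkk, ih (k + 1) (aStep cs acc k) (by omega) (by omega)]
      have hsub : ((((k + 1 : Nat)) : Int) - 1) = (k : Int) := by push_cast; ring
      rw [hsub]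
      have hget : PySem.List.pyGet? cs (k : Int) = some cs[k] := by
        rw [PySem.List.pyGet?_natCast]
        exact List.getElem?_eq_getElem hk'
      rw [List.drop_eq_getElem_cons hk']
      have hhd : (List.drop (k + 1) cs).head? = PySem.List.pyGet? cs ((k : Int) + 1) := by
        rw [hkk, PySem.List.pyGet?_natCast, List.head?_drop]
      simp only [aStep, hget, Option.getD_some, gA_cons, ← hhd]
      split
      · simp [digO]
      · simp [digO]

-- B's separator matches the digit test on the part edges
lemma sepPiece_strIsdigit_last (l : List Char) :
    PySem.Chars.strIsdigit (PySem.List.slice l (some (-1)) none) = digO l.getLast? := by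
  rw [PySem.List.slice_from_neg_one]
  induction l with
  | nil => simp [PySem.Chars.strIsdigit, digO]
  | cons a t ih =>
      cases t with
      | nil => simp [PySem.Chars.strIsdigit, digO]
      | cons b u =>
          have hlen : (a :: b :: u).length - 1 = ((b :: u).length - 1) + 1 := by
            simp [List.length_cons]
          rw [hlen, List.drop_succ_cons, ih, List.getLast?_cons_cons]

lemma sepPiece_strIsdigit_head (r : List Char) :
    PySem.Chars.strIsdigit (PySem.List.slice r none (some 1)) = digO r.head? := by
  rw [PySem.List.slice_to r (by norm_num)]
  cases r <;> simp [PySem.Chars.strIsdigit, digO]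

lemma sepPiece_eq (l r : List Char) :
    sepPiece l r = [if digO l.getLast? && digO r.head? then ',' else ' '] := by
  unfold sepPiece
  rw [sepPiece_strIsdigit_last, sepPiece_strIsdigit_head]
  split <;> simp_all

-- B's piece-building fold, flattened, is tailJoin
lemma flatJB (rest : List (List Char)) : ∀ (p : List Char),
    (((p :: rest).zip rest).flatMap (fun pr => [sepPiece pr.1 pr.2, pr.2])).flatten
      = tailJoin (digO p.getLast?) rest := by
  induction rest with
  | nil => intro p; simp [tailJoin]
  | cons q rs ih =>
      intro p
      simp only [List.zip_cons_cons, List.flatMap_cons, List.flatten_append]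
      rw [ih q]
      simp [sepPiece_eq, tailJoin]

lemma join_nil_eq_flatten (ps : List (List Char)) : PySem.Chars.join [] ps = ps.flatten := by
  induction ps with
  | nil => simp [PySem.Chars.join_nil]
  | cons p qs ih =>
      cases qs with
      | nil => simp [PySem.Chars.join_singleton]
      | cons q rs =>
          rw [PySem.Chars.join_cons_cons]
          simp only [List.flatten_cons]
          rw [ih]
          simp

-- edges of stripChars output are never the stripped character
lemma head?_dropWhile_false {p : Char → Bool} (l : List Char) (x : Char)
    (h : (l.dropWhile p).head? = some x) : p x = false := by
  induction l with
  | nil => simp at h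
  | cons a t ih =>
      by_cases hpa : p a = true
      · rw [List.dropWhile_cons_of_pos hpa] at h
        exact ih h
      · rw [List.dropWhile_cons_of_neg hpa] at h
        simp at h
        subst h
        simpa using hpa

lemma getLast?_dropWhile {p : Char → Bool} (l : List Char) (x : Char)
    (h : (l.dropWhile p).getLast? = some x) : l.getLast? = some x := by
  induction l with
  | nil => simp at h
  | cons a t ih =>
      by_cases hpa : p a = true
      · rw [List.dropWhile_cons_of_pos hpa] at h
        have ht := ih h
        cases t with
        | nil => simp at ht
        | cons b u => rw [List.getLast?_cons_cons]; exact ht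
      · rw [List.dropWhile_cons_of_neg hpa] at h
        exact h

lemma strip_getLast (s : List Char) :
    (PySem.Chars.stripChars s [',']).getLast? ≠ some ',' := by
  simp only [PySem.Chars.stripChars]
  intro h
  rw [List.getLast?_reverse] at h
  have := head?_dropWhile_false _ _ h
  simp at this

lemma strip_head (s : List Char) :
    (PySem.Chars.stripChars s [',']).head? ≠ some ',' := by
  simp only [PySem.Chars.stripChars]
  intro h
  rw [List.head?_reverse] at h
  have hX := getLast?_dropWhile _ _ h
  rw [List.getLast?_reverse] at hX
  have := head?_dropWhile_false _ _ hX
  simp at this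

-- the whole computation, on the stripped character list
lemma core (cs : List Char) (hhead : cs.head? ≠ some ',') (hlast : cs.getLast? ≠ some ',') :
    aLoop cs = PySem.Chars.join [] (bPieces (PySem.Chars.splitOn cs [','])) := by
  unfold aLoop
  have ha := aLoop_eq_gA cs cs.length 0 [] (by omega) (Nat.zero_le _)
  rw [show (((0 : Nat)) : Int) - 1 = (-1 : Int) by norm_num, PySem.List.pyGet?_neg_one] at ha
  simp only [Nat.cast_zero, List.drop_zero, List.nil_append] at ha
  rw [ha]
  rw [splitOn_eq_sc0]
  cases hsc : sc0 cs with
  | nil => exact absurd hsc (sc0_ne_nil cs)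
  | cons q qs =>
    simp only [bPieces]
    rw [PySem.List.foldl_append_eq_flatMap (g := fun pr : List Char × List Char => [sepPiece pr.1 pr.2, pr.2])]
    rw [join_nil_eq_flatten]
    rw [List.flatten_append, List.flatten_cons, List.flatten_nil, List.append_nil]
    rw [flatJB qs q]
    have hmain := gA_eq_join cs (digO cs.getLast?) q qs hlast hsc
    by_cases hq : q.isEmpty
    · have hqe : q = [] := by simpa using hq
      subst hqe
      cases qs with
      | nil => rw [hmain]; simp [tailJoin]
      | cons q2 qs2 =>
          exfalso
          cases hcc : cs with
          | nil => rw [hcc] at hsc; simp [sc0] at hsc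
          | cons c rest =>
            by_cases hc : c = ','
            · exact hhead (by rw [hcc, hc]; simp)
            · rw [hcc, sc0_cons_of_ne c rest hc] at hsc
              cases hh : sc0 rest with
              | nil => exact absurd hh (sc0_ne_nil rest)
              | cons p ps =>
                  rw [hh] at hsc
                  simp [consHead] at hsc
    · rw [hmain, if_neg (by simpa using hq)]

-- ===== VERDICT (by name: the statement is the Claim_ definition above) =====
theorem del_comma_spec : Claim_equal_del_comma := by
  intro word _
  unfold Spec_del_comma del_comma del_comma_alt
  exact congrArg String.ofList (core _ (strip_head _) (strip_getLast _))
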